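-- pv_equiv track=rewrite | github.com/ArchonMegalon/fleet | scripts/chummer6_design_canon.py | _paragraph
-- ===== SOURCE A (Python) =====
-- def _paragraph(text: str) -> str:
--     parts: list[str] = []
--     for raw in str(text or "").splitlines():
--         line = raw.strip()
--         if not line:
--             if parts:
--                 break
--             continue
--         if line.startswith("* "):
--             continue
--         parts.append(line)
--     return " ".join(parts).strip()
-- ===== SOURCE B (Python) =====
-- def _paragraph(text: str) -> str:
--     stripped = [ln.strip() for ln in str(text or "").splitlines()]
--     blocks: list[list[str]] = []
--     cur: list[str] = []
--     for ln in stripped: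
--         if ln:
--             cur.append(ln)
--         elif cur:
--             blocks.append(cur)
--             cur = []
--     if cur:
--         blocks.append(cur)
--     for block in blocks:
--         content = [ln for ln in block if not ln.startswith("* ")]
--         if content:
--             return " ".join(content).strip()
--     return ""
-- ===== Notes on version B (the rewrite author's own statement) =====
-- stated objective: alternative
-- what changed: Replaces A's single scan with a break-on-blank-after-content flag by a three-stage decomposition: split the stripped lines into blank-separated blocks, select the first block containing a non-bullet line, then filter out bullet lines and join.
import Mathlib
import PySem

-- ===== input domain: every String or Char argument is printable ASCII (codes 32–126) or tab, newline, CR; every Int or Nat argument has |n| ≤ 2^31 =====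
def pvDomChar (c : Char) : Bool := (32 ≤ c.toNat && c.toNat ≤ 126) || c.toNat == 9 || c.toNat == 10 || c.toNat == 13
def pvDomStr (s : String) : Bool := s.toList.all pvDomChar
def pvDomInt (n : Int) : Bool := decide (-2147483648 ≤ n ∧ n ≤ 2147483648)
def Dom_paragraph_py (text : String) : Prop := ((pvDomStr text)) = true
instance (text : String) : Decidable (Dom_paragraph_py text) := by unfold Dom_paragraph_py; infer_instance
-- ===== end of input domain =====

-- B replaces A's scan-with-break-flag loop by a segment-into-blocks / select-first-usable-block /
-- filter-bullets decomposition (objective: alternative decomposition, same cost).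

-- ===== PORT A =====
-- the for-loop of A: state = parts; a blank line breaks once parts is non-empty
def pvALoop : List String → List String → List String
  | [], parts => parts
  | raw :: rest, parts =>
    let line := PySem.Str.strip raw
    if line = "" then
      if parts ≠ [] then parts else pvALoop rest parts
    else if PySem.Str.startswith line "* " then pvALoop rest parts
    else pvALoop rest (parts ++ [line])

def paragraph_py (text : String) : String :=
  -- str(text or "") on a str argument is the string itself when non-empty, else ""
  PySem.Str.strip (PySem.Str.join " "
    (pvALoop (PySem.Str.splitlines (if text = "" then "" else text)) []))

-- ===== PORT B =====
-- Source B's bullet filter: `not ln.startswith("* ")`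
def pvKeep (ln : String) : Bool := !(PySem.Str.startswith ln "* ")

-- Source B's grouping loop: state = (blocks, cur)
def pvBlocksLoop : List String → List (List String) → List String → List (List String) × List String
  | [], blocks, cur => (blocks, cur)
  | ln :: rest, blocks, cur =>
    if ln ≠ "" then pvBlocksLoop rest blocks (cur ++ [ln])
    else if cur ≠ [] then pvBlocksLoop rest (blocks ++ [cur]) []
    else pvBlocksLoop rest blocks cur

-- Source B's trailing `if cur: blocks.append(cur)`
def pvFinalize (p : List (List String) × List String) : List (List String) :=
  if p.2 ≠ [] then p.1 ++ [p.2] else p.1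

-- Source B's second loop: the first block with a non-bullet line wins
def pvPick : List (List String) → String
  | [] => ""
  | block :: bs =>
    let content := block.filter pvKeep
    if content ≠ [] then PySem.Str.strip (PySem.Str.join " " content) else pvPick bs

def paragraph_py_alt (text : String) : String :=
  pvPick (pvFinalize (pvBlocksLoop
    ((PySem.Str.splitlines (if text = "" then "" else text)).map PySem.Str.strip) [] []))

-- ===== PRECONDITION & SPEC =====
def Spec_paragraph_py (text : String) (out : String) : Prop := out = paragraph_py_alt text
instance (text : String) (out : String) : Decidable (Spec_paragraph_py text out) := by unfold Spec_paragraph_py; infer_instance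

-- ===== CLAIM (what is proved, stated in full; the proofs are below) =====
def Claim_equal_paragraph_py : Prop := ∀ (text : String), Dom_paragraph_py text → Spec_paragraph_py text (paragraph_py text)

-- ===== LEMMAS AND PROOFS =====

-- non-blank test, as a Bool predicate for takeWhile
def pvNB (l : String) : Bool := l ≠ ""

-- what A collects once parts is non-empty: stripped lines until the first blank, bullets dropped
def pvCollect : List String → List String
  | [] => []
  | raw :: rest =>
    if PySem.Str.strip raw = "" then []
    else if PySem.Str.startswith (PySem.Str.strip raw) "* " then pvCollect rest
    else PySem.Str.strip raw :: pvCollect rest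

-- the blocks Source B's grouping loop still produces from the remaining stripped lines and open block cur
def pvFinal : List String → List String → List (List String)
  | [], cur => if cur ≠ [] then [cur] else []
  | ln :: rest, cur =>
    if ln ≠ "" then pvFinal rest (cur ++ [ln])
    else if cur ≠ [] then cur :: pvFinal rest []
    else pvFinal rest cur

theorem pvBlocksLoop_final (ls : List String) (blocks : List (List String)) (cur : List String) :
    pvFinalize (pvBlocksLoop ls blocks cur) = blocks ++ pvFinal ls cur := by
  induction ls generalizing blocks cur with
  | nil =>
    simp only [pvBlocksLoop, pvFinalize, pvFinal]
    split_ifs <;> simp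
  | cons ln rest ih =>
    by_cases h1 : ln ≠ ""
    · simp only [pvBlocksLoop, pvFinal, if_pos h1]; exact ih ..
    · by_cases h2 : cur ≠ []
      · simp only [pvBlocksLoop, pvFinal, if_neg h1, if_pos h2]
        rw [ih]; simp
      · simp only [pvBlocksLoop, pvFinal, if_neg h1, if_neg h2]; exact ih ..

theorem pvALoop_ne (ls : List String) (parts : List String) (h : parts ≠ []) :
    pvALoop ls parts = parts ++ pvCollect ls := by
  induction ls generalizing parts with
  | nil => simp [pvALoop, pvCollect]
  | cons raw rest ih =>
    by_cases h1 : PySem.Str.strip raw = ""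
    · simp only [pvALoop, pvCollect, if_pos h1, if_pos h, List.append_nil]
    · by_cases h2 : PySem.Str.startswith (PySem.Str.strip raw) "* " = true
      · simp only [pvALoop, pvCollect, if_neg h1, if_pos h2]; exact ih _ h
      · simp only [pvALoop, pvCollect, if_neg h1, if_neg h2]
        rw [ih _ (by simp)]; simp

theorem pvCollect_eq (ls : List String) :
    pvCollect ls = ((ls.map PySem.Str.strip).takeWhile pvNB).filter pvKeep := by
  induction ls with
  | nil => rfl
  | cons raw rest ih =>
    by_cases h1 : PySem.Str.strip raw = ""
    · have hb : pvNB (PySem.Str.strip raw) = false := by simp [pvNB, h1]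
      simp only [pvCollect, if_pos h1, List.map_cons, List.takeWhile_cons, hb,
        Bool.false_eq_true, if_false, List.filter_nil]
    · have hb : pvNB (PySem.Str.strip raw) = true := by simp [pvNB, h1]
      by_cases h2 : PySem.Str.startswith (PySem.Str.strip raw) "* " = true
      · have hk : pvKeep (PySem.Str.strip raw) = false := by
          simp only [pvKeep, h2, Bool.not_true]
        simp only [pvCollect, if_neg h1, if_pos h2, List.map_cons, List.takeWhile_cons, hb,
          if_true, List.filter_cons, hk, Bool.false_eq_true, if_false, ih]
      · have h2f : PySem.Str.startswith (PySem.Str.strip raw) "* " = false := by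
          cases hx : PySem.Str.startswith (PySem.Str.strip raw) "* " with
          | false => rfl
          | true => exact absurd hx h2
        have hk : pvKeep (PySem.Str.strip raw) = true := by
          simp only [pvKeep, h2f, Bool.not_false]
        simp only [pvCollect, if_neg h1, if_neg h2, List.map_cons, List.takeWhile_cons, hb,
          if_true, List.filter_cons, hk, ih]

theorem pvPick_final (ls : List String) (cur : List String) (hc : cur ≠ [])
    (hnb : cur.filter pvKeep ≠ []) :
    pvPick (pvFinal ls cur) =
      PySem.Str.strip (PySem.Str.join " " ((cur ++ ls.takeWhile pvNB).filter pvKeep)) := by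
  induction ls generalizing cur with
  | nil =>
    simp only [pvFinal, if_pos hc, pvPick, List.takeWhile_nil, List.append_nil]
    rw [if_pos hnb]
  | cons ln rest ih =>
    by_cases h1 : ln ≠ ""
    · have hb : pvNB ln = true := by simp [pvNB, h1]
      have hnb' : (cur ++ [ln]).filter pvKeep ≠ [] := by
        rw [List.filter_append]
        exact List.append_ne_nil_of_left_ne_nil hnb _
      simp only [pvFinal, if_pos h1, List.takeWhile_cons, hb, if_true]
      rw [ih (cur ++ [ln]) (by simp) hnb']
      simp
    · have hb : pvNB ln = false := by simp [pvNB, h1]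
      simp only [pvFinal, if_neg h1, if_pos hc, pvPick, List.takeWhile_cons, hb,
        Bool.false_eq_true, if_false, List.append_nil]
      rw [if_pos hnb]

theorem pvMain (ls : List String) (cur : List String)
    (hnb : cur.filter pvKeep = []) :
    PySem.Str.strip (PySem.Str.join " " (pvALoop ls [])) =
      pvPick (pvFinal (ls.map PySem.Str.strip) cur) := by
  induction ls generalizing cur with
  | nil =>
    simp only [pvALoop, List.map_nil, pvFinal]
    by_cases h : cur ≠ []
    · rw [if_pos h]
      simp only [pvPick, hnb, ne_eq, not_true_eq_false, if_false]
      rfl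
    · rw [if_neg h]; rfl
  | cons raw rest ih =>
    by_cases h1 : PySem.Str.strip raw = ""
    · have h1' : ¬ (PySem.Str.strip raw ≠ "") := by simp [h1]
      simp only [pvALoop, if_pos h1, List.map_cons, pvFinal, if_neg h1',
        ne_eq, not_true_eq_false, if_false, ite_not]
      by_cases h2 : cur = []
      · rw [if_pos h2, h2]
        exact ih [] rfl
      · rw [if_neg h2]
        simp only [pvPick, hnb, ne_eq, not_true_eq_false, if_false]
        exact ih [] rfl
    · by_cases h2 : PySem.Str.startswith (PySem.Str.strip raw) "* " = true
      · have hk : pvKeep (PySem.Str.strip raw) = false := by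
          simp only [pvKeep, h2, Bool.not_true]
        simp only [pvALoop, if_neg h1, if_pos h2, List.map_cons, pvFinal,
          if_pos (show PySem.Str.strip raw ≠ "" from h1)]
        rw [ih (cur ++ [PySem.Str.strip raw]) (by rw [List.filter_append]; simp [hnb, hk])]
      · have h2f : PySem.Str.startswith (PySem.Str.strip raw) "* " = false := by
          cases hx : PySem.Str.startswith (PySem.Str.strip raw) "* " with
          | false => rfl
          | true => exact absurd hx h2
        have hk : pvKeep (PySem.Str.strip raw) = true := by
          simp only [pvKeep, h2f, Bool.not_false]
        simp only [pvALoop, if_neg h1, if_neg h2, List.map_cons, pvFinal,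
          if_pos (show PySem.Str.strip raw ≠ "" from h1)]
        rw [pvALoop_ne _ _ (by simp), pvPick_final _ _ (by simp)
          (by rw [List.filter_append]; simp [hk])]
        congr 1
        rw [List.filter_append, List.filter_append, hnb, pvCollect_eq]
        simp only [List.nil_append, List.filter_cons, List.filter_nil, hk, if_true]

-- ===== VERDICT (by name: the statement is the Claim_ definition above) =====
theorem paragraph_py_spec : Claim_equal_paragraph_py := by
  intro text _
  unfold Spec_paragraph_py paragraph_py paragraph_py_alt
  rw [pvBlocksLoop_final]
  exact pvMain _ [] rfl
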